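-- pv_equiv track=rewrite | github.com/pytroll/pygranule | pygranule/file_name_parser.py | _comma_split
-- ===== SOURCE A (Python) =====
-- def _comma_split(s):
--     level=0
--     splt = []
--     start_i = 0
--     for i in range(len(s)):
--         if s[i] == '{':
--             level += 1
--         elif s[i] == '}':
--             level -= 1
--         if s[i] == ',' and level == 0:
--             splt.append(s[start_i:i])
--             start_i=i+1
--     splt.append(s[start_i:len(s)])
--     return splt
-- ===== SOURCE B (Python) =====
-- def _comma_split(s):
--     # two-pass: materialize cumulative brace levels, then find cut points and slice
--     level = 0
--     levels = []
--     for c in s: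
--         level += (c == '{') - (c == '}')
--         levels.append(level)
--     cuts = [i for i, c in enumerate(s) if c == ',' and levels[i] == 0]
--     starts = [0] + [p + 1 for p in cuts]
--     ends = cuts + [len(s)]
--     return [s[a:b] for a, b in zip(starts, ends)]
-- ===== Notes on version B (the rewrite author's own statement) =====
-- stated objective: alternative
-- what changed: Replaces the single interleaved scan carrying (level, pieces, segment start) with a two-pass decomposition: first materialize the cumulative brace-level table, then collect the top-level comma indices and build the result by slicing between consecutive cut points.
import Mathlib
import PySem

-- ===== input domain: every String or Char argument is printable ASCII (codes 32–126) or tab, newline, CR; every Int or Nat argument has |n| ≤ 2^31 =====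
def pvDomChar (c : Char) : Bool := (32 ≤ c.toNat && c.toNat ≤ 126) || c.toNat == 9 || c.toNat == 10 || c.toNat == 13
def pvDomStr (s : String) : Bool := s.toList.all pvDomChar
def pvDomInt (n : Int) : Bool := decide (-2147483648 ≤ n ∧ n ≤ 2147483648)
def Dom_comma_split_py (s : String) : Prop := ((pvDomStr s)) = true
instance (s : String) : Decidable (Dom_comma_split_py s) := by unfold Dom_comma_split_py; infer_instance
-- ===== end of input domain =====

-- B replaces A's single interleaved scan with a two-pass decomposition (levels table, then cut points and slices); same cost, alternative structure.

-- ===== PORT A =====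
-- one loop over indices carrying (level, pieces so far, current segment start)
def comma_split_py (s : String) : List String :=
  let cs := s.toList
  let st := (PySem.List.pyRange 0 (cs.length : Int) 1).foldl
    (fun (st : Int × List String × Int) i =>
      let c := PySem.List.pyGetD cs i ' '
      let level := if c = '{' then st.1 + 1 else if c = '}' then st.1 - 1 else st.1
      if c = ',' ∧ level = 0 then
        (level, st.2.1 ++ [String.ofList (PySem.List.slice cs (some st.2.2) (some i))], i + 1)
      else
        (level, st.2.1, st.2.2))
    (0, [], 0)
  st.2.1 ++ [String.ofList (PySem.List.slice cs (some st.2.2) (some (cs.length : Int)))]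

-- ===== PORT B =====
-- pass 1: cumulative brace-level table; pass 2: top-level comma indices; then slice between cut points
def comma_split_py_alt (s : String) : List String :=
  let cs := s.toList
  let levels := (cs.foldl
    (fun (st : Int × List Int) c =>
      let l := st.1 + ((if c = '{' then (1 : Int) else 0) - (if c = '}' then (1 : Int) else 0))
      (l, st.2 ++ [l])) ((0 : Int), ([] : List Int))).2
  let cuts := ((PySem.List.enumerate cs 0).filter
      (fun p => decide (p.2 = ',') && decide (PySem.List.pyGetD levels p.1 0 = 0))).map (·.1)
  let starts := (0 : Int) :: cuts.map (· + 1)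
  let ends := cuts ++ [(cs.length : Int)]
  (starts.zip ends).map (fun p => String.ofList (PySem.List.slice cs (some p.1) (some p.2)))

-- ===== PRECONDITION & SPEC =====
def Spec_comma_split_py (s : String) (out : List String) : Prop := out = comma_split_py_alt s
instance (s : String) (out : List String) : Decidable (Spec_comma_split_py s out) := by unfold Spec_comma_split_py; infer_instance

-- ===== CLAIM (what is proved, stated in full; the proofs are below) =====
def Claim_equal_comma_split_py : Prop := ∀ (s : String), Dom_comma_split_py s → Spec_comma_split_py s (comma_split_py s)

-- ===== LEMMAS AND PROOFS =====

-- per-character brace contribution and cumulative level of a prefix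
def pvDelta (c : Char) : Int := (if c = '{' then 1 else 0) - (if c = '}' then 1 else 0)
def pvBal (cs : List Char) : Int := (cs.map pvDelta).sum

-- A's loop body, with the character supplied alongside its index
def pvStepA (cs : List Char) (st : Int × List String × Int) (p : Int × Char) : Int × List String × Int :=
  let c := p.2
  let level := if c = '{' then st.1 + 1 else if c = '}' then st.1 - 1 else st.1
  if c = ',' ∧ level = 0 then
    (level, st.2.1 ++ [String.ofList (PySem.List.slice cs (some st.2.2) (some p.1))], p.1 + 1)
  else
    (level, st.2.1, st.2.2)

-- B's level-building loop body
def pvStepB (st : Int × List Int) (c : Char) : Int × List Int :=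
  let l := st.1 + ((if c = '{' then (1 : Int) else 0) - (if c = '}' then (1 : Int) else 0))
  (l, st.2 ++ [l])

-- the canonical cut condition: a comma whose cumulative level is 0
def pvCond (cs : List Char) (p : Int × Char) : Bool :=
  decide (p.2 = ',') && decide (pvBal (cs.take (p.1.toNat + 1)) = 0)

def pvCuts (cs suff : List Char) (j : Int) : List Int :=
  ((PySem.List.enumerate suff j).filter (pvCond cs)).map (·.1)

-- slices of cs between consecutive cut points, trailing segment always emitted
def pvSegs (cs : List Char) : Int → List Int → List String
  | st, [] => [String.ofList (PySem.List.slice cs (some st) (some (cs.length : Int)))]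
  | st, p :: ps => String.ofList (PySem.List.slice cs (some st) (some p)) :: pvSegs cs (p + 1) ps

lemma pvLevel_eq (b : Int) (c : Char) :
    (if c = '{' then b + 1 else if c = '}' then b - 1 else b) = b + pvDelta c := by
  by_cases h1 : c = '{'
  · simp [pvDelta, h1]
  · by_cases h2 : c = '}'
    · simp [pvDelta, h2]
      omega
    · simp [pvDelta, h1, h2]

lemma pvBal_take_succ (cs : List Char) (j : Nat) (hj : j < cs.length) :
    pvBal (cs.take (j + 1)) = pvBal (cs.take j) + pvDelta cs[j] := by
  have h1 : cs.take (j + 1) = cs.take j ++ [cs[j]] := by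
    rw [List.take_add_one, List.getElem?_eq_getElem hj]; rfl
  unfold pvBal
  rw [h1, List.map_append, List.sum_append]
  simp

lemma pvA_loop (cs : List Char) :
    ∀ (suff : List Char) (j start : Nat) (acc : List String), suff = cs.drop j →
    (let st := (PySem.List.enumerate suff (j : Int)).foldl (pvStepA cs)
        (pvBal (cs.take j), acc, (start : Int));
     st.2.1 ++ [String.ofList (PySem.List.slice cs (some st.2.2) (some (cs.length : Int)))])
    = acc ++ pvSegs cs (start : Int) (pvCuts cs suff (j : Int)) := by
  intro suff
  induction suff with
  | nil =>
      intro j start acc _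
      simp [PySem.List.enumerate_nil, pvCuts, pvSegs]
  | cons c rest ih =>
      intro j start acc h
      have hj : j < cs.length := by
        by_contra hge
        rw [List.drop_eq_nil_of_le (by omega)] at h
        exact List.cons_ne_nil c rest h
      have hc : cs[j] = c := by
        have h0 : (cs.drop j)[0]'(by rw [← h]; simp) = c := by
          simp [← h]
        simpa using h0
      have hrest : rest = cs.drop (j + 1) := by
        have htd : (cs.drop j).tail = cs.drop (j + 1) := List.tail_drop
        rw [← h] at htd
        simpa using htd
      have hbal : pvBal (cs.take (j + 1)) = pvBal (cs.take j) + pvDelta c := by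
        rw [pvBal_take_succ cs j hj, hc]
      rw [PySem.List.enumerate_cons]
      simp only [List.foldl_cons]
      have hstep0 : (if c = '{' then pvBal (cs.take j) + 1
          else if c = '}' then pvBal (cs.take j) - 1 else pvBal (cs.take j))
          = pvBal (cs.take (j + 1)) := by
        rw [pvLevel_eq, hbal]
      by_cases hcnd : c = ',' ∧ pvBal (cs.take (j + 1)) = 0
      · have hA : pvStepA cs (pvBal (cs.take j), acc, (start : Int)) ((j : Int), c)
            = (pvBal (cs.take (j + 1)),
               acc ++ [String.ofList (PySem.List.slice cs (some (start : Int)) (some (j : Int)))],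
               (j : Int) + 1) := by
          simp only [pvStepA, hstep0]
          rw [if_pos hcnd]
        rw [hA]
        have hcast : ((j : Int) + 1) = ((j + 1 : Nat) : Int) := by push_cast; ring
        rw [hcast, ih (j + 1) (j + 1)
          (acc ++ [String.ofList (PySem.List.slice cs (some (start : Int)) (some (j : Int)))]) hrest]
        have hcut : pvCuts cs (c :: rest) (j : Int)
            = (j : Int) :: pvCuts cs rest ((j + 1 : Nat) : Int) := by
          simp only [pvCuts, PySem.List.enumerate_cons, List.filter_cons]
          rw [if_pos (by simp [pvCond, hcnd.1, hcnd.2])]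
          rw [hcast]
          simp
        rw [hcut]
        simp only [pvSegs]
        rw [hcast]
        simp
      · have hA : pvStepA cs (pvBal (cs.take j), acc, (start : Int)) ((j : Int), c)
            = (pvBal (cs.take (j + 1)), acc, (start : Int)) := by
          simp only [pvStepA, hstep0]
          rw [if_neg hcnd]
        rw [hA]
        have hcast : ((j : Int) + 1) = ((j + 1 : Nat) : Int) := by push_cast; ring
        rw [hcast, ih (j + 1) start acc hrest]
        have hcut : pvCuts cs (c :: rest) (j : Int)
            = pvCuts cs rest ((j + 1 : Nat) : Int) := by
          simp only [pvCuts, PySem.List.enumerate_cons, List.filter_cons]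
          rw [if_neg (by simp [pvCond]; intro h1 h2; exact hcnd ⟨h1, h2⟩)]
          rw [hcast]
        rw [hcut]

lemma pvA_eq (s : String) :
    comma_split_py s = pvSegs s.toList 0 (pvCuts s.toList s.toList 0) := by
  have hmap : PySem.List.enumerate s.toList 0
      = (PySem.List.pyRange 0 (s.toList.length : Int) 1).map
          (fun j => (j, PySem.List.pyGetD s.toList j ' ')) := by
    simpa [PySem.List.len] using PySem.List.enumerate_eq_map_pyRange s.toList ' '
  have h0 := pvA_loop s.toList s.toList 0 0 [] (by simp)
  simp only [List.take_zero, Nat.cast_zero] at h0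
  rw [show pvBal [] = 0 from rfl] at h0
  rw [hmap, List.foldl_map, List.nil_append] at h0
  exact h0

lemma pvLevels_spec :
    ∀ (rest : List Char) (l : Int) (acc : List Int),
    (rest.foldl pvStepB (l, acc)).2
      = acc ++ (List.range rest.length).map (fun k => l + pvBal (rest.take (k + 1))) := by
  intro rest
  induction rest with
  | nil => intro l acc; simp
  | cons c rest ih =>
      intro l acc
      have hstep : pvStepB (l, acc) c = (l + pvDelta c, acc ++ [l + pvDelta c]) := rfl
      simp only [List.foldl_cons, hstep, ih]
      rw [List.length_cons, List.range_succ_eq_map]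
      simp only [List.map_cons, List.map_map]
      have h0 : l + pvBal ((c :: rest).take (0 + 1)) = l + pvDelta c := by
        simp [pvBal]
      have hfun : ((fun k => l + pvBal ((c :: rest).take (k + 1))) ∘ Nat.succ)
          = fun k => l + pvDelta c + pvBal (rest.take (k + 1)) := by
        funext k
        simp [Function.comp, pvBal, List.take_succ_cons]
        ring
      rw [hfun, h0]
      simp

lemma pvB_eq (s : String) :
    comma_split_py_alt s = pvSegs s.toList 0 (pvCuts s.toList s.toList 0) := by
  set cs := s.toList with hcs
  have hlev : (cs.foldl pvStepB ((0 : Int), ([] : List Int))).2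
      = (List.range cs.length).map (fun k => pvBal (cs.take (k + 1))) := by
    rw [pvLevels_spec]
    simp
  have hfilter : (PySem.List.enumerate cs 0).filter
      (fun p => decide (p.2 = ',') && decide
        (PySem.List.pyGetD ((cs.foldl pvStepB ((0:Int), ([] : List Int))).2) p.1 0 = 0))
      = (PySem.List.enumerate cs 0).filter (pvCond cs) := by
    apply List.filter_congr
    intro p hp
    rw [PySem.List.mem_enumerate_iff] at hp
    obtain ⟨k, hk, hpk⟩ := hp
    subst hpk
    simp only [zero_add]
    rw [hlev]
    have hget : PySem.List.pyGetD ((List.range cs.length).map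
        (fun k => pvBal (cs.take (k + 1)))) ((k : Int)) (0 : Int)
        = pvBal (cs.take (k + 1)) := by
      rw [PySem.List.pyGetD_natCast]
      simp [List.getD, hk]
    rw [hget]
    simp only [pvCond, Int.toNat_natCast]
    rfl
  have hzip : ∀ (ps : List Int) (st : Int),
      (((st :: ps.map (· + 1)).zip (ps ++ [(cs.length : Int)])).map
        (fun p => String.ofList (PySem.List.slice cs (some p.1) (some p.2))))
      = pvSegs cs st ps := by
    intro ps
    induction ps with
    | nil => intro st; simp [pvSegs]
    | cons p ps ih =>
        intro st
        simp only [List.map_cons, List.cons_append, List.zip_cons_cons, List.map_cons, pvSegs]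
        exact congrArg _ (ih (p + 1))
  have hB : comma_split_py_alt s
      = ((((0 : Int) :: (((PySem.List.enumerate cs 0).filter
            (fun p => decide (p.2 = ',') && decide
              (PySem.List.pyGetD ((cs.foldl pvStepB ((0 : Int), ([] : List Int))).2) p.1 0 = 0))).map (·.1)).map (· + 1)).zip
          ((((PySem.List.enumerate cs 0).filter
            (fun p => decide (p.2 = ',') && decide
              (PySem.List.pyGetD ((cs.foldl pvStepB ((0 : Int), ([] : List Int))).2) p.1 0 = 0))).map (·.1)) ++ [(cs.length : Int)])).map
          (fun p => String.ofList (PySem.List.slice cs (some p.1) (some p.2)))) := rfl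
  rw [hB, hfilter]
  exact hzip _ 0

-- ===== VERDICT (by name: the statement is the Claim_ definition above) =====
theorem comma_split_py_spec : Claim_equal_comma_split_py := by
  intro s _
  unfold Spec_comma_split_py
  rw [pvA_eq, pvB_eq]
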